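-- pv_equiv track=rewrite | github.com/SamvelProgramming/EXC2026 | lights.py | lights
-- ===== SOURCE A (Python) =====
-- def lights(n):
--     light = n * [False]
--     for i in range(1, n + 1):
--         for j in range(n):
--             if (j + 1) % i == 0:
--                 if light[j] is False:
--                     light[j] = True
--                 else:
--                     light[j] = False
--     count = 0
--     for i in light:
--         if i is True:
--             count += 1
--
--     return count
-- ===== SOURCE B (Python) =====
-- def lights(n):
--     # After toggling light j once per divisor of j+1 in 1..n, light j is on
--     # iff j+1 has an odd number of divisors, i.e. iff j+1 is a perfect square.
--     # So the answer is floor(sqrt(n)): find it directly.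
--     r = 0
--     while (r + 1) * (r + 1) <= n:
--         r += 1
--     return r
-- ===== Notes on version B (the rewrite author's own statement) =====
-- stated objective: faster
-- what changed: B replaces the O(n^2) double toggle loop by the number-theoretic closed form: the count of lights left on is floor(sqrt(n)), computed by a simple integer-square-root search loop.
import Mathlib
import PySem

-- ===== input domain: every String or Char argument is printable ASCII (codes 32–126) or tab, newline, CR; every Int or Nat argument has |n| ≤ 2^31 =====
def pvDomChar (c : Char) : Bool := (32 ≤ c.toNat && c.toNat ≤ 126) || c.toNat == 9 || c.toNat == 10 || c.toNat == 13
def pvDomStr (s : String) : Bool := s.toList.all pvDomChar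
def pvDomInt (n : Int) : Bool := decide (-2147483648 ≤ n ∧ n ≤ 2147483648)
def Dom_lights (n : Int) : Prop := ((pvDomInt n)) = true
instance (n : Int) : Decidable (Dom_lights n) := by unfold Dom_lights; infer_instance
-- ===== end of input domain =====

-- B replaces A's O(n^2) toggle simulation by the closed form floor(sqrt(n)) (the lights left on
-- are exactly the perfect squares), computed by an integer-square-root search loop.

-- ===== PORT A =====
def lights (n : Int) : Int :=
  let light := List.replicate n.toNat false
  let light := (PySem.List.pyRange 1 (n + 1) 1).foldl (fun light i =>
      (PySem.List.pyRange 0 n 1).foldl (fun light j =>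
        if PySem.Int.mod (j + 1) i = 0 then
          if PySem.List.pyGetD light j false = false then
            light.set j.toNat true
          else
            light.set j.toNat false
        else light) light) light
  light.foldl (fun count i => if i = true then count + 1 else count) 0

-- ===== PORT B =====
def lightsAltLoop (n : Int) (r : Int) : Int :=
  if (r + 1) * (r + 1) ≤ n then lightsAltLoop n (r + 1) else r
termination_by (n + 1 - r).toNat
decreasing_by
  have h1 : r + 1 ≤ (r + 1) * (r + 1) := by nlinarith [sq_nonneg (r + 1), sq_nonneg r]
  omega

def lights_alt (n : Int) : Int := lightsAltLoop n 0

-- ===== PRECONDITION & SPEC =====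
def Spec_lights (n : Int) (out : Int) : Prop := out = lights_alt n
instance (n : Int) (out : Int) : Decidable (Spec_lights n out) := by unfold Spec_lights; infer_instance

-- ===== CLAIM (what is proved, stated in full; the proofs are below) =====
def Claim_equal_lights : Prop := ∀ (n : Int), Dom_lights n → Spec_lights n (lights n)

-- ===== LEMMAS AND PROOFS =====

def condB (i : Int) (k : Nat) : Bool := decide (PySem.Int.mod ((k : Int) + 1) i = 0)

lemma set_map_range {α : Type} (f : ℕ → α) (m j : ℕ) (v : α) (hj : j < m) :
    ((List.range m).map f).set j v = (List.range m).map (fun k => if k = j then v else f k) := by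
  apply List.ext_getElem (by simp)
  intro k h1 h2
  simp only [List.getElem_set, List.getElem_map, List.getElem_range]
  by_cases h : j = k <;> simp [h, eq_comm]

lemma inner_aux (i : Int) (m t : ℕ) (ht : t ≤ m) (f : ℕ → Bool) :
    (List.range t).foldl (fun light (k : ℕ) =>
        if PySem.Int.mod ((k : Int) + 1) i = 0 then
          if light.getD k false = false then light.set k true else light.set k false
        else light) ((List.range m).map f)
    = (List.range m).map (fun k => if k < t ∧ condB i k then !(f k) else f k) := by
  induction t with
  | zero => simp
  | succ t ih =>
    rw [List.range_succ, List.foldl_append]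
    rw [ih (by omega)]
    set ft : ℕ → Bool := fun k => if k < t ∧ condB i k then !(f k) else f k with hft
    simp only [List.foldl_cons, List.foldl_nil]
    have hget : ((List.range m).map ft).getD t false = f t := by
      rw [PySem.List.getD_map_range ft m t false (by omega)]
      simp [hft]
    by_cases hc : PySem.Int.mod ((t : Int) + 1) i = 0
    · have hcB : condB i t = true := by simp [condB, hc]
      have hset : ∀ v, ((List.range m).map ft).set t v
          = (List.range m).map (fun k => if k = t then v else ft k) := fun v =>
        set_map_range ft m t v (by omega)
      have : (if PySem.Int.mod ((t : Int) + 1) i = 0 then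
          if ((List.range m).map ft).getD t false = false then ((List.range m).map ft).set t true
          else ((List.range m).map ft).set t false
        else ((List.range m).map ft)) = ((List.range m).map ft).set t (!(f t)) := by
        rw [if_pos hc, hget]
        cases hf : f t <;> simp
      rw [this, hset]
      apply List.map_congr_left
      intro k hk
      rw [List.mem_range] at hk
      by_cases hkt : k = t
      · subst hkt; simp [hcB]
      · simp only [if_neg hkt, hft]
        have : (k < t + 1 ∧ condB i k = true) ↔ (k < t ∧ condB i k = true) := by
          constructor
          · rintro ⟨h1', h2'⟩; exact ⟨by omega, h2'⟩
          · rintro ⟨h1', h2'⟩; exact ⟨by omega, h2'⟩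
        split_ifs with h1' h2' h2' <;> tauto
    · rw [if_neg hc]
      apply List.map_congr_left
      intro k hk
      rw [List.mem_range] at hk
      simp only [hft]
      have hcB : condB i t = false := by simp [condB, hc]
      by_cases hkt : k = t
      · subst hkt; simp [hcB]
      · have : (k < t + 1 ∧ condB i k = true) ↔ (k < t ∧ condB i k = true) := by
          constructor
          · rintro ⟨h1', h2'⟩; refine ⟨?_, h2'⟩
            rcases Nat.lt_succ_iff_lt_or_eq.mp h1' with h | h
            · exact h
            · exact absurd h hkt
          · rintro ⟨h1', h2'⟩; exact ⟨by omega, h2'⟩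
        split_ifs with h1' h2' h2' <;> tauto

lemma outer_aux (m : ℕ) (L : List Int) (f : ℕ → Bool) :
    L.foldl (fun light i =>
      (List.range m).foldl (fun light (k : ℕ) =>
        if PySem.Int.mod ((k : Int) + 1) i = 0 then
          if light.getD k false = false then light.set k true else light.set k false
        else light) light) ((List.range m).map f)
    = (List.range m).map
        (fun k => xor (decide (Odd (L.countP (fun i => condB i k)))) (f k)) := by
  induction L generalizing f with
  | nil =>
    simp only [List.foldl_nil, List.countP_nil]
    apply List.map_congr_left
    intro k _
    simp
  | cons i L ih =>
    simp only [List.foldl_cons]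
    rw [inner_aux i m m (le_refl m) f, ih]
    apply List.map_congr_left
    intro k hk
    rw [List.mem_range] at hk
    rw [List.countP_cons]
    by_cases hc : condB i k = true
    · cases hodd : decide (Odd (L.countP fun i => condB i k)) <;>
        cases hf : f k <;>
        simp_all [Nat.odd_add_one]
    · have hc' : condB i k = false := by simpa using hc
      simp [hc', hk]

lemma port_shape (n : Int) (m : ℕ) (hm : ((m : ℕ) : Int) = n) (L : List Int) (f : ℕ → Bool) :
    L.foldl (fun light i =>
      (PySem.List.pyRange 0 n 1).foldl (fun light j =>
        if PySem.Int.mod (j + 1) i = 0 then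
          if PySem.List.pyGetD light j false = false then
            light.set j.toNat true
          else
            light.set j.toNat false
        else light) light) ((List.range m).map f)
    = (List.range m).map
        (fun k => xor (decide (Odd (L.countP (fun i => condB i k)))) (f k)) := by
  have hbody : (fun (light : List Bool) (i : Int) =>
      (PySem.List.pyRange 0 n 1).foldl (fun light j =>
        if PySem.Int.mod (j + 1) i = 0 then
          if PySem.List.pyGetD light j false = false then
            light.set j.toNat true
          else
            light.set j.toNat false
        else light) light)
      = (fun (light : List Bool) (i : Int) =>
      (List.range m).foldl (fun light (k : ℕ) =>
        if PySem.Int.mod ((k : Int) + 1) i = 0 then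
          if light.getD k false = false then light.set k true else light.set k false
        else light) light) := by
    funext light i
    rw [← hm, PySem.List.pyRange_one]
    have h0 : ((m : Int) - 0).toNat = m := by omega
    rw [h0, List.foldl_map]
    simp only [zero_add, PySem.List.pyGetD_natCast, Int.toNat_natCast]
  rw [hbody, outer_aux]

lemma count_fold (l : List Bool) :
    l.foldl (fun count i => if i = true then count + 1 else count) (0 : Int)
    = (l.countP (fun b => b) : Int) := by
  rw [PySem.List.foldl_ite_add_one (fun b : Bool => b = true) l 0]
  simp

lemma finset_filter_range_card (m : ℕ) (q : ℕ → Prop) [DecidablePred q] :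
    ((Finset.range m).filter q).card = (List.range m).countP (fun t => decide (q t)) := by
  rw [List.countP_eq_length_filter]
  rfl

lemma count_divisors (m k : ℕ) (hk : k < m) :
    (List.range m).countP (fun t => decide ((t + 1) ∣ (k + 1))) = (k + 1).divisors.card := by
  rw [← finset_filter_range_card m (fun t => (t + 1) ∣ (k + 1))]
  apply Finset.card_bij (fun t _ => t + 1)
  · intro t ht
    rw [Finset.mem_filter] at ht
    exact Nat.mem_divisors.mpr ⟨ht.2, by omega⟩
  · intro a _ b _ h; omega
  · intro d hd
    rw [Nat.mem_divisors] at hd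
    have hd1 : 1 ≤ d := Nat.pos_of_dvd_of_pos hd.1 (by omega)
    have hdle : d ≤ k + 1 := Nat.le_of_dvd (by omega) hd.1
    refine ⟨d - 1, ?_, by omega⟩
    rw [Finset.mem_filter, Finset.mem_range]
    constructor
    · omega
    · have : d - 1 + 1 = d := by omega
      rw [this]; exact hd.1

lemma parity_divisors (k : ℕ) (hk : 0 < k) :
    Odd k.divisors.card ↔ Nat.sqrt k * Nat.sqrt k = k := by
  have h1 : (k.divisors.filter fun d => d * d < k).card
      + (k.divisors.filter fun d => ¬(d * d < k)).card = k.divisors.card :=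
    Finset.card_filter_add_card_filter_not _
  have h2 : ((k.divisors.filter fun d => ¬(d * d < k)).filter fun d => d * d = k).card
      + ((k.divisors.filter fun d => ¬(d * d < k)).filter fun d => ¬(d * d = k)).card
      = (k.divisors.filter fun d => ¬(d * d < k)).card :=
    Finset.card_filter_add_card_filter_not _
  rw [Finset.filter_filter, Finset.filter_filter] at h2
  have hCeq : (k.divisors.filter fun d => ¬(d * d < k) ∧ d * d = k)
      = k.divisors.filter fun d => d * d = k := by
    apply Finset.filter_congr; intro d _; constructor
    · rintro ⟨_, h⟩; exact h
    · intro h; exact ⟨by omega, h⟩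
  have hBeq : (k.divisors.filter fun d => ¬(d * d < k) ∧ ¬(d * d = k))
      = k.divisors.filter fun d => k < d * d := by
    apply Finset.filter_congr; intro d _; constructor
    · rintro ⟨h1', h2'⟩; omega
    · intro h; omega
  rw [hCeq, hBeq] at h2
  -- the two unbalanced parts pair up under d ↦ k / d
  have hAB : (k.divisors.filter fun d => d * d < k).card
      = (k.divisors.filter fun d => k < d * d).card := by
    apply Finset.card_bij (fun d _ => k / d)
    · intro d hd
      rw [Finset.mem_filter, Nat.mem_divisors] at hd
      obtain ⟨⟨hdvd, hk0⟩, hlt⟩ := hd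
      have hdpos : 0 < d := Nat.pos_of_dvd_of_pos hdvd hk
      have hde : d * (k / d) = k := Nat.mul_div_cancel' hdvd
      have hdlt : d < k / d := by
        have h' : d * d < d * (k / d) := by rw [hde]; exact hlt
        exact lt_of_mul_lt_mul_left h' (Nat.zero_le d)
      rw [Finset.mem_filter, Nat.mem_divisors]
      refine ⟨⟨⟨d, (Nat.div_mul_cancel hdvd).symm⟩, hk0⟩, ?_⟩
      calc k = d * (k / d) := hde.symm
        _ < (k / d) * (k / d) := (Nat.mul_lt_mul_right (by omega)).mpr hdlt
    · intro a ha b hb hab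
      rw [Finset.mem_filter, Nat.mem_divisors] at ha hb
      have : k / (k / a) = k / (k / b) := by rw [hab]
      rwa [Nat.div_div_self ha.1.1 ha.1.2, Nat.div_div_self hb.1.1 hb.1.2] at this
    · intro e he
      rw [Finset.mem_filter, Nat.mem_divisors] at he
      obtain ⟨⟨hedvd, hk0⟩, hegt⟩ := he
      have hepos : 0 < e := Nat.pos_of_dvd_of_pos hedvd hk
      have hee : e * (k / e) = k := Nat.mul_div_cancel' hedvd
      have haux : k / e < e := by
        apply Nat.lt_of_mul_lt_mul_left (a := e)
        rw [hee]; exact hegt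
      have hapos : 0 < k / e := Nat.div_pos (Nat.le_of_dvd hk hedvd) hepos
      refine ⟨k / e, ?_, Nat.div_div_self hedvd hk0⟩
      rw [Finset.mem_filter, Nat.mem_divisors]
      refine ⟨⟨⟨e, (Nat.div_mul_cancel hedvd).symm⟩, hk0⟩, ?_⟩
      calc (k / e) * (k / e) < (k / e) * e := (Nat.mul_lt_mul_left hapos).mpr haux
        _ = k := Nat.div_mul_cancel hedvd
  -- the middle part has exactly one element iff k is a perfect square
  have hC : (k.divisors.filter fun d => d * d = k).card
      = if Nat.sqrt k * Nat.sqrt k = k then 1 else 0 := by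
    by_cases hsq : Nat.sqrt k * Nat.sqrt k = k
    · rw [if_pos hsq]
      have : (k.divisors.filter fun d => d * d = k) = {Nat.sqrt k} := by
        apply Finset.ext; intro d
        rw [Finset.mem_filter, Nat.mem_divisors, Finset.mem_singleton]
        constructor
        · rintro ⟨_, hdd⟩
          have : Nat.sqrt (d * d) = Nat.sqrt k := by rw [hdd]
          rwa [Nat.sqrt_eq] at this
        · rintro rfl
          exact ⟨⟨⟨Nat.sqrt k, hsq.symm⟩, by omega⟩, hsq⟩
      rw [this, Finset.card_singleton]
    · rw [if_neg hsq]
      rw [Finset.card_eq_zero]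
      apply Finset.eq_empty_of_forall_notMem
      intro d hd
      rw [Finset.mem_filter] at hd
      have : Nat.sqrt (d * d) = Nat.sqrt k := by rw [hd.2]
      rw [Nat.sqrt_eq] at this
      exact hsq (by rw [← this]; exact hd.2)
  rw [← h1, ← h2, hAB, hC]
  by_cases hsq : Nat.sqrt k * Nat.sqrt k = k
  · rw [if_pos hsq]
    constructor
    · intro _; exact hsq
    · intro _; rw [Nat.odd_iff]; omega
  · rw [if_neg hsq]
    constructor
    · intro hodd; exfalso; rw [Nat.odd_iff] at hodd; omega
    · intro h; exact absurd h hsq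

lemma sqrt_succ (m : ℕ) :
    Nat.sqrt (m + 1)
      = if Nat.sqrt (m + 1) * Nat.sqrt (m + 1) = m + 1 then Nat.sqrt m + 1 else Nat.sqrt m := by
  have hs1 : Nat.sqrt m ≤ Nat.sqrt (m + 1) := Nat.sqrt_le_sqrt (by omega)
  have hs2 : Nat.sqrt (m + 1) ≤ Nat.sqrt m + 1 := by
    have h1 : m < (Nat.sqrt m + 1) * (Nat.sqrt m + 1) := Nat.lt_succ_sqrt m
    have h2 : Nat.sqrt (m + 1) < Nat.sqrt m + 2 := by
      rw [Nat.sqrt_lt]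
      nlinarith
    omega
  by_cases hsq : Nat.sqrt (m + 1) * Nat.sqrt (m + 1) = m + 1
  · rw [if_pos hsq]
    have hne : Nat.sqrt (m + 1) ≠ Nat.sqrt m := by
      intro heq
      have := Nat.sqrt_le m
      rw [← heq] at this
      omega
    omega
  · rw [if_neg hsq]
    have : Nat.sqrt (m + 1) ≠ Nat.sqrt m + 1 := by
      intro heq
      have h1 : Nat.sqrt (m + 1) * Nat.sqrt (m + 1) ≤ m + 1 := Nat.sqrt_le (m + 1)
      have h2 : m < (Nat.sqrt m + 1) * (Nat.sqrt m + 1) := Nat.lt_succ_sqrt m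
      rw [heq] at h1
      exact hsq (by rw [heq]; omega)
    omega

lemma count_squares (m : ℕ) :
    (List.range m).countP (fun j => decide (Nat.sqrt (j + 1) * Nat.sqrt (j + 1) = j + 1))
      = Nat.sqrt m := by
  induction m with
  | zero => simp
  | succ m ih =>
    rw [List.range_succ, List.countP_append, ih]
    rw [sqrt_succ m]
    by_cases hsq : Nat.sqrt (m + 1) * Nat.sqrt (m + 1) = m + 1 <;>
      simp [hsq]

lemma loop_spec_aux (n : Int) : ∀ (fuel : ℕ) (r : Int), (n + 1 - r).toNat ≤ fuel →
    0 ≤ r → r * r ≤ n → lightsAltLoop n r = ((Nat.sqrt n.toNat : ℕ) : Int) := by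
  intro fuel
  induction fuel with
  | zero =>
    intro r hfuel hr hrr
    exfalso
    have h1 : r ≤ r * r := by nlinarith [sq_nonneg r]
    omega
  | succ fuel ih =>
    intro r hfuel hr hrr
    rw [lightsAltLoop]
    by_cases h : (r + 1) * (r + 1) ≤ n
    · rw [if_pos h]
      have h1 : r + 1 ≤ (r + 1) * (r + 1) := by nlinarith [sq_nonneg (r + 1), sq_nonneg r]
      exact ih (r + 1) (by omega) (by omega) h
    · rw [if_neg h]
      have hq : r = ((r.toNat : ℕ) : Int) := by omega
      set q := r.toNat with hqdef
      have hq1 : ((q * q : ℕ) : Int) = r * r := by push_cast; rw [← hq]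
      have hq2 : ((((q + 1) * (q + 1)) : ℕ) : Int) = (r + 1) * (r + 1) := by push_cast; rw [← hq]
      have hn : 0 ≤ n := le_trans (by nlinarith [sq_nonneg r]) hrr
      have hle : q * q ≤ n.toNat := by omega
      have hlt : n.toNat < (q + 1) * (q + 1) := by omega
      have hup : q ≤ Nat.sqrt n.toNat := Nat.le_sqrt.mpr hle
      have hdown : Nat.sqrt n.toNat < q + 1 := Nat.sqrt_lt.mpr hlt
      omega

-- ===== VERDICT =====
-- ===== VERDICT =====
theorem lights_spec : Claim_equal_lights := by
  intro n _
  unfold Spec_lights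
  by_cases hn : n ≤ 0
  · have hA : lights n = 0 := by
      simp only [lights]
      rw [PySem.List.pyRange_one_eq_nil (by omega : n + 1 ≤ 1)]
      simp [Int.toNat_of_nonpos hn]
    have hB : lights_alt n = 0 := by
      unfold lights_alt
      rw [lightsAltLoop]
      rw [if_neg (by nlinarith : ¬ ((0 : Int) + 1) * (0 + 1) ≤ n)]
    rw [hA, hB]
  · replace hn : 0 < n := by omega
    set m := n.toNat with hmdef
    have hm : ((m : ℕ) : Int) = n := by omega
    have hbase : List.replicate n.toNat false = (List.range m).map (fun _ => false) := by
      rw [List.map_const', List.length_range, hmdef]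
    simp only [lights]
    rw [hbase, port_shape n m hm, count_fold, List.countP_map]
    have hpy1 : PySem.List.pyRange 1 (n + 1) 1 = (List.range m).map (fun k : ℕ => 1 + (k : Int)) := by
      rw [PySem.List.pyRange_one]
      have h1 : (n + 1 - 1).toNat = m := by omega
      rw [h1]
    have hfin : (List.range m).countP ((fun b => b) ∘ fun k =>
        xor (decide (Odd ((PySem.List.pyRange 1 (n + 1) 1).countP fun i => condB i k))) false)
        = Nat.sqrt m := by
      rw [← count_squares m]
      apply List.countP_congr
      intro k hk
      rw [List.mem_range] at hk
      simp only [Function.comp, Bool.xor_false, decide_eq_true_eq]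
      rw [hpy1, List.countP_map]
      have h1 : (List.range m).countP ((fun i => condB i k) ∘ fun t : ℕ => 1 + (t : Int))
          = (List.range m).countP (fun t => decide ((t + 1) ∣ (k + 1))) := by
        apply List.countP_congr
        intro t _
        simp only [Function.comp, condB, decide_eq_true_eq]
        rw [PySem.Int.mod_eq_zero_iff_dvd,
          show (1 + (t : Int)) = ((t + 1 : ℕ) : Int) by push_cast; ring,
          show ((k : Int) + 1) = ((k + 1 : ℕ) : Int) by push_cast; ring,
          Int.natCast_dvd_natCast]
      rw [h1, count_divisors m k hk]
      exact parity_divisors (k + 1) (by omega)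
    rw [hfin]
    have hB : lights_alt n = ((Nat.sqrt n.toNat : ℕ) : Int) :=
      loop_spec_aux n (n + 1).toNat 0 (by omega) le_rfl (by nlinarith)
    rw [hB, hmdef]
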